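-- pv_equiv track=rewrite | github.com/uygarpolat/advent-of-code | day15/day15.py | move_the_robot
-- ===== SOURCE A (Python) =====
-- def is_in_grid(grid, loc):
--     rows = len(grid)
--     cols = len(grid[0])
--     row = loc[0]
--     col = loc[1]
--     if 0 <= row < rows and 0 <= col < cols:
--         return True
--     return False
--
-- def move_the_robot(grid, old_loc, dir):
--     new_loc = tuple(map(sum, zip(old_loc, dir)))
--     if not is_in_grid(grid, new_loc):
--         return old_loc
--     value_old = grid[old_loc[0]][old_loc[1]]
--     value_new = grid[new_loc[0]][new_loc[1]]
--     if value_new == '#':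
--         return old_loc
--     if value_new == '.':
--         grid[new_loc[0]][new_loc[1]] = value_old
--         grid[old_loc[0]][old_loc[1]] = '.'
--         return new_loc
--     elif value_new == 'O':
--         returnable = move_the_robot(grid, new_loc, dir)
--         if returnable == new_loc:
--             return old_loc
--         else:
--             grid[new_loc[0]][new_loc[1]] = value_old
--             grid[old_loc[0]][old_loc[1]] = '.'
--             return new_loc
-- ===== SOURCE B (Python) =====
-- def move_the_robot(grid, old_loc, dir):
--     # Iterative re-implementation: scan forward to the first non-'O' cell instead of recursing.
--     rows, cols = len(grid), len(grid[0])
--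
--     def inside(r, c):
--         return 0 <= r < rows and 0 <= c < cols
--
--     dr, dc = dir
--     r, c = old_loc
--     nr, nc = r + dr, c + dc
--     if not inside(nr, nc):
--         return old_loc
--     cell = grid[nr][nc]
--     if cell == '#':
--         return old_loc
--     if cell == 'O':
--         tr, tc = nr + dr, nc + dc
--         while inside(tr, tc) and grid[tr][tc] == 'O':
--             tr += dr
--             tc += dc
--         if not inside(tr, tc) or grid[tr][tc] == '#':
--             return old_loc
--         if grid[tr][tc] == '.':
--             grid[tr][tc] = 'O'
--     elif cell != '.':
--         return old_loc
--     grid[nr][nc] = grid[r][c]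
--     grid[r][c] = '.'
--     return (nr, nc)
-- ===== Notes on version B (the rewrite author's own statement) =====
-- stated objective: alternative
-- what changed: The recursive box-chain push is replaced by an iterative scan: walk a pointer forward along dir past the consecutive 'O' cells and decide blocked/free from the single terminator cell, instead of recursing one cell at a time and propagating the result back.
-- outside the precondition, e.g. on move_the_robot([['.', '.'], ['#']], (0, 0), (1, 0)): A returns (0, 0), B returns (0, 0)
import Mathlib
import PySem

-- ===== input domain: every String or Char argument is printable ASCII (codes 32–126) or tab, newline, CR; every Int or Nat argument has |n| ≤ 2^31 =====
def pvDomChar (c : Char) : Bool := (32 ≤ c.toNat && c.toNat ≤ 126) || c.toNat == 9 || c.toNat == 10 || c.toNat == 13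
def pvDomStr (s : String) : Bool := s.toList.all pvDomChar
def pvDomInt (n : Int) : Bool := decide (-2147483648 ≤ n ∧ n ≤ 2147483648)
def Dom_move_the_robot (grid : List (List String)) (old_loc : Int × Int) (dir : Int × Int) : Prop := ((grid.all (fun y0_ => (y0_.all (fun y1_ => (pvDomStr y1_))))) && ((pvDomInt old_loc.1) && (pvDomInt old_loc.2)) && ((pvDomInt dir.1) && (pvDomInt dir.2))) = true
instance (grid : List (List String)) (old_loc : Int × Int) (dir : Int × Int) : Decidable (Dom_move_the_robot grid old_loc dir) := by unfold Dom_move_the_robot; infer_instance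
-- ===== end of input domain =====

-- B replaces A's recursive box-chain push by an iterative scan to the first non-'O' cell; the
-- equivalence proved is about the RETURN value only (both Pythons mutate the grid; that side
-- effect is not modelled here and may differ when old_loc uses negative wrapped indices).

-- ===== PORT A =====
-- shared cell accessors (Python grid[r][c] with wraparound; .getD covers only indices Python
-- raises on, which Pre_ excludes)
def pvCell (g : List (List String)) (r c : Int) : String :=
  (PySem.List.pyGet? ((PySem.List.pyGet? g r).getD []) c).getD ""

def pvCols (g : List (List String)) : Nat := ((PySem.List.pyGet? g 0).getD []).length

def is_in_grid (g : List (List String)) (loc : Int × Int) : Bool :=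
  decide (0 ≤ loc.1 ∧ loc.1 < (g.length : Int) ∧ 0 ≤ loc.2 ∧ loc.2 < (pvCols g : Int))

-- A's recursion, fuel-bounded (fuel only makes it total: rows+cols+1 always suffices on Pre_
-- inputs, proved below); `none` is Python's `return None` fall-through; the grid mutation (and
-- the value_old read that feeds it) does not influence the return value and is not modelled.
def moveAux : Nat → List (List String) → Int × Int → Int × Int → Option (Int × Int)
  | 0, _, old_loc, _ => some old_loc
  | fuel+1, grid, old_loc, dir =>
    let new_loc : Int × Int := (old_loc.1 + dir.1, old_loc.2 + dir.2)
    if is_in_grid grid new_loc = false then some old_loc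
    else
      let value_new := pvCell grid new_loc.1 new_loc.2
      if value_new = "#" then some old_loc
      else if value_new = "." then some new_loc
      else if value_new = "O" then
        let returnable := moveAux fuel grid new_loc dir
        if returnable = some new_loc then some old_loc else some new_loc
      else none

def move_the_robot (grid : List (List String)) (old_loc : Int × Int) (dir : Int × Int) : Int × Int :=
  (moveAux (grid.length + pvCols grid + 1) grid old_loc dir).getD old_loc

-- ===== PORT B =====
-- the while-loop pointer walk (fuel-bounded for totality; rows+cols steps always suffice on Pre_ inputs)
def scanT : Nat → List (List String) → Int × Int → Int × Int → Int × Int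
  | 0, _, t, _ => t
  | f+1, g, t, dir =>
    if is_in_grid g t && (pvCell g t.1 t.2 == "O") then
      scanT f g (t.1 + dir.1, t.2 + dir.2) dir
    else t

def move_the_robot_alt (grid : List (List String)) (old_loc : Int × Int) (dir : Int × Int) : Int × Int :=
  let new_loc : Int × Int := (old_loc.1 + dir.1, old_loc.2 + dir.2)
  if ¬ is_in_grid grid new_loc then old_loc
  else
    let cell := pvCell grid new_loc.1 new_loc.2
    if cell = "#" then old_loc
    else if cell = "O" then
      let t := scanT (grid.length + pvCols grid) grid (new_loc.1 + dir.1, new_loc.2 + dir.2) dir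
      if ¬ is_in_grid grid t ∨ pvCell grid t.1 t.2 = "#" then old_loc else new_loc
    else if cell ≠ "." then old_loc
    else new_loc

-- ===== PRECONDITION & SPEC =====
-- Pre_ excludes exactly: the empty grid (A raises IndexError on len(grid[0])) and, when the
-- target cell lies in the grid: rows shorter than row 0 (IndexError on the rows the push may
-- touch; an over-approximation), out-of-range old_loc reads (IndexError), dir=(0,0) pushing
-- against 'O' (A recurses forever), and an adjacent cell outside {'#','.','O'} (A falls
-- through and returns None, not a pair).
def Pre_move_the_robot (grid : List (List String)) (old_loc : Int × Int) (dir : Int × Int) : Prop :=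
  grid ≠ [] ∧
  (is_in_grid grid (old_loc.1 + dir.1, old_loc.2 + dir.2) = true →
    ((∀ row ∈ grid, pvCols grid ≤ row.length) ∧
     -(grid.length : Int) ≤ old_loc.1 ∧ old_loc.1 < (grid.length : Int) ∧
     -(pvCols grid : Int) ≤ old_loc.2 ∧ old_loc.2 < (pvCols grid : Int) ∧
     pvCell grid (old_loc.1 + dir.1) (old_loc.2 + dir.2) ∈ (["#", ".", "O"] : List String) ∧
     (pvCell grid (old_loc.1 + dir.1) (old_loc.2 + dir.2) = "O" → dir ≠ (0, 0))))
instance (grid : List (List String)) (old_loc : Int × Int) (dir : Int × Int) : Decidable (Pre_move_the_robot grid old_loc dir) := by unfold Pre_move_the_robot; infer_instance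

def pvWitness_move_the_robot : List (List String) × (Int × Int) × (Int × Int) :=
  ([["@", "O"], [".", "."]], (0, 0), (1, 0))

def Spec_move_the_robot (grid : List (List String)) (old_loc : Int × Int) (dir : Int × Int) (out : Int × Int) : Prop := out = move_the_robot_alt grid old_loc dir
instance (grid : List (List String)) (old_loc : Int × Int) (dir : Int × Int) (out : Int × Int) : Decidable (Spec_move_the_robot grid old_loc dir out) := by unfold Spec_move_the_robot; infer_instance

-- ===== CLAIM (what is proved, stated in full; the proofs are below) =====
def Claim_equal_move_the_robot : Prop := ∀ (grid : List (List String)) (old_loc : Int × Int) (dir : Int × Int), Dom_move_the_robot grid old_loc dir → Pre_move_the_robot grid old_loc dir → Spec_move_the_robot grid old_loc dir (move_the_robot grid old_loc dir)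

-- ===== LEMMAS AND PROOFS =====

-- proof-side measure: steps before the walk leaves the grid along dir
def pvM (g : List (List String)) (dir : Int × Int) (p : Int × Int) : Nat :=
  if 0 < dir.1 then ((g.length : Int) - p.1).toNat
  else if dir.1 < 0 then (p.1 + 1).toNat
  else if 0 < dir.2 then ((pvCols g : Int) - p.2).toNat
  else (p.2 + 1).toNat

-- proof-side reference predicate: the chain starting after p is blocked
def blockedAfter : Nat → List (List String) → Int × Int → Int × Int → Bool
  | 0, _, _, _ => true
  | f+1, g, dir, p =>
    let q : Int × Int := (p.1 + dir.1, p.2 + dir.2)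
    if is_in_grid g q = false then true
    else if pvCell g q.1 q.2 = "#" then true
    else if pvCell g q.1 q.2 = "O" then blockedAfter f g dir q
    else false

lemma pvM_lt (g : List (List String)) (dir p : Int × Int) (hd : dir ≠ (0, 0))
    (h : is_in_grid g (p.1 + dir.1, p.2 + dir.2) = true) :
    pvM g dir (p.1 + dir.1, p.2 + dir.2) < pvM g dir p := by
  have hd' : dir.1 ≠ 0 ∨ dir.2 ≠ 0 := by
    by_contra hc
    rw [not_or, not_not, not_not] at hc
    exact hd (Prod.ext hc.1 hc.2)
  simp only [is_in_grid, decide_eq_true_eq] at h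
  simp only [pvM]
  split_ifs with h1 h2 h3 <;> omega

lemma pvM_le (g : List (List String)) (dir p : Int × Int)
    (h : is_in_grid g p = true) : pvM g dir p ≤ g.length + pvCols g := by
  simp only [is_in_grid, decide_eq_true_eq] at h
  simp only [pvM]
  split_ifs <;> omega

lemma shift_ne_self (p dir : Int × Int) (hd : dir ≠ (0, 0)) :
    ((p.1 + dir.1, p.2 + dir.2) : Int × Int) ≠ p := by
  intro hc
  apply hd
  have h1 : p.1 + dir.1 = p.1 := congrArg Prod.fst hc
  have h2 : p.2 + dir.2 = p.2 := congrArg Prod.snd hc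
  exact Prod.ext (by omega) (by omega)

-- A's recursion returns its own argument exactly when the chain after it is blocked
lemma moveAux_blocked (g : List (List String)) (dir : Int × Int) (hd : dir ≠ (0, 0)) :
    ∀ (f : Nat) (p : Int × Int), pvM g dir p ≤ f →
      ((moveAux f g p dir = some p) ↔ blockedAfter f g dir p = true) := by
  intro f
  induction f with
  | zero => intro p _; simp [moveAux, blockedAfter]
  | succ f ih =>
    intro p hf
    simp only [moveAux, blockedAfter]
    by_cases hq : is_in_grid g (p.1 + dir.1, p.2 + dir.2) = true
    · have hlt := pvM_lt g dir p hd hq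
      have hne := shift_ne_self p dir hd
      simp only [hq, Bool.true_eq_false, if_false]
      by_cases h1 : pvCell g (p.1 + dir.1) (p.2 + dir.2) = "#"
      · simp [h1]
      · by_cases h2 : pvCell g (p.1 + dir.1) (p.2 + dir.2) = "."
        · simp [h2, hne]
        · by_cases h3 : pvCell g (p.1 + dir.1) (p.2 + dir.2) = "O"
          · have ihq := ih (p.1 + dir.1, p.2 + dir.2) (by omega)
            simp only [h3, if_true]
            by_cases hb : blockedAfter f g dir (p.1 + dir.1, p.2 + dir.2) = true
            · simp [ihq.mpr hb, hb]
            · have : moveAux f g (p.1 + dir.1, p.2 + dir.2) dir ≠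
                  some (p.1 + dir.1, p.2 + dir.2) := fun hc => hb (ihq.mp hc)
              simp only [this, if_false]
              simp [hne, hb]
          · simp [h1, h2, h3]
    · simp [hq]

-- the blocked predicate is what B's scan-and-test computes
lemma blockedAfter_eq_scan (g : List (List String)) (dir : Int × Int) (hd : dir ≠ (0, 0)) :
    ∀ (f : Nat) (p : Int × Int), pvM g dir p ≤ f →
      blockedAfter f g dir p =
        (!(is_in_grid g (scanT f g (p.1 + dir.1, p.2 + dir.2) dir)) ||
          (pvCell g (scanT f g (p.1 + dir.1, p.2 + dir.2) dir).1
            (scanT f g (p.1 + dir.1, p.2 + dir.2) dir).2 == "#")) := by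
  intro f
  induction f with
  | zero =>
    intro p hf
    by_cases hq : is_in_grid g (p.1 + dir.1, p.2 + dir.2) = true
    · exact absurd (pvM_lt g dir p hd hq) (by omega)
    · simp only [blockedAfter, scanT]
      simp [hq]
  | succ f ih =>
    intro p hf
    simp only [blockedAfter, scanT]
    by_cases hq : is_in_grid g (p.1 + dir.1, p.2 + dir.2) = true
    · have hlt := pvM_lt g dir p hd hq
      by_cases h1 : pvCell g (p.1 + dir.1) (p.2 + dir.2) = "#"
      · simp [hq, h1]
      · by_cases h3 : pvCell g (p.1 + dir.1) (p.2 + dir.2) = "O"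
        · have := ih (p.1 + dir.1, p.2 + dir.2) (by omega)
          simp only [hq, h3, Bool.true_eq_false, if_false, if_true]
          simpa [hq, h3] using this
        · simp [hq, h1, h3]
    · simp [hq]

-- ===== VERDICT (by name: the statement is the Claim_ definition above) =====
theorem move_the_robot_spec : Claim_equal_move_the_robot := by
  intro grid old_loc dir _ hpre
  obtain ⟨-, hinner⟩ := hpre
  show move_the_robot grid old_loc dir = move_the_robot_alt grid old_loc dir
  simp only [move_the_robot, move_the_robot_alt, moveAux]
  by_cases hq : is_in_grid grid (old_loc.1 + dir.1, old_loc.2 + dir.2) = true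
  · obtain ⟨-, -, -, -, -, hcell, hO⟩ := hinner hq
    by_cases h1 : pvCell grid (old_loc.1 + dir.1) (old_loc.2 + dir.2) = "#"
    · simp [hq, h1]
    · by_cases h2 : pvCell grid (old_loc.1 + dir.1) (old_loc.2 + dir.2) = "."
      · simp [hq, h2]
      · have h3 : pvCell grid (old_loc.1 + dir.1) (old_loc.2 + dir.2) = "O" := by
          simp only [List.mem_cons] at hcell
          tauto
        have hd : dir ≠ (0, 0) := hO h3
        have hm : pvM grid dir (old_loc.1 + dir.1, old_loc.2 + dir.2) ≤
            grid.length + pvCols grid := pvM_le grid dir _ hq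
        have hA := moveAux_blocked grid dir hd (grid.length + pvCols grid)
          (old_loc.1 + dir.1, old_loc.2 + dir.2) hm
        have hB := blockedAfter_eq_scan grid dir hd (grid.length + pvCols grid)
          (old_loc.1 + dir.1, old_loc.2 + dir.2) hm
        rw [hB] at hA
        by_cases hs : (!(is_in_grid grid (scanT (grid.length + pvCols grid) grid
              ((old_loc.1 + dir.1) + dir.1, (old_loc.2 + dir.2) + dir.2) dir)) ||
            (pvCell grid (scanT (grid.length + pvCols grid) grid
                ((old_loc.1 + dir.1) + dir.1, (old_loc.2 + dir.2) + dir.2) dir).1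
              (scanT (grid.length + pvCols grid) grid
                ((old_loc.1 + dir.1) + dir.1, (old_loc.2 + dir.2) + dir.2) dir).2 == "#")) = true
        · have hr := hA.mpr hs
          simp only [Bool.or_eq_true, Bool.not_eq_true', beq_iff_eq] at hs
          rcases hs with h | h
          · simp [hq, h3, hr, h]
          · simp [hq, h3, hr, h]
        · have hr : moveAux (grid.length + pvCols grid) grid
              (old_loc.1 + dir.1, old_loc.2 + dir.2) dir ≠
              some (old_loc.1 + dir.1, old_loc.2 + dir.2) := fun hc => hs (hA.mp hc)
          simp only [Bool.or_eq_true, Bool.not_eq_true', beq_iff_eq, not_or] at hs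
          simp [hq, h3, hr, hs.1, hs.2]
  · simp [hq]
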